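-- pv_equiv track=rewrite | github.com/lymchgmk/Algorithm-Problem-Solving | Progammers/코딩테스트/Coupang/3.py | solution
-- ===== SOURCE A (Python) =====
-- def solution(k, score):
--     score_diff = []
--     for i in range(len(score)-1):
--         score_diff.append(score[i] - score[i+1])
--
--     score_dict = dict()
--     for diff in score_diff:
--         if diff not in score_dict.keys():
--             score_dict[diff] = 1
--         else:
--             score_dict[diff] = score_dict[diff]+1
--
--     temp = []
--     for idx, diff in enumerate(score_dict.values()):
--         if diff >= k:
--             temp.append(idx)
--
--     result_keys = []
--     for t in temp:
--         result_keys.append(list(score_dict.keys())[t])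
--
--     result_default_set = set(list(range(1, len(score)+1)))
--     result_set = set()
--     for idx, diff in enumerate(score_diff):
--         if diff in result_keys:
--             result_set.add(idx+1)
--             result_set.add(idx+2)
--
--     result = len(result_default_set - result_set)
--
--     return result
-- ===== SOURCE B (Python) =====
-- def solution(k, score):
--     # Count each diff once, then ONE streaming pass with a carry flag marks covered
--     # positions on the fly; no frequent set, no marked-position set, no set difference.
--     n = len(score)
--     diffs = [score[i] - score[i + 1] for i in range(n - 1)]
--     counts = {}
--     for d in diffs:
--         counts[d] = counts.get(d, 0) + 1
--     covered = 0
--     prev = False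
--     for d in diffs:
--         cur = counts[d] >= k
--         if prev or cur:
--             covered += 1
--         prev = cur
--     if prev:
--         covered += 1
--     return n - covered
-- ===== Notes on version B (the rewrite author's own statement) =====
-- stated objective: alternative
-- what changed: B replaces A's staged set machinery (enumerate-values selection, index-back-into-keys list, per-diff linear membership scans in result_keys, marked position set and a set difference) by one streaming pass over the diffs with a carry flag that counts covered positions on the fly after a single counting pass; answer is n minus the covered tally.
import Mathlib
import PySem

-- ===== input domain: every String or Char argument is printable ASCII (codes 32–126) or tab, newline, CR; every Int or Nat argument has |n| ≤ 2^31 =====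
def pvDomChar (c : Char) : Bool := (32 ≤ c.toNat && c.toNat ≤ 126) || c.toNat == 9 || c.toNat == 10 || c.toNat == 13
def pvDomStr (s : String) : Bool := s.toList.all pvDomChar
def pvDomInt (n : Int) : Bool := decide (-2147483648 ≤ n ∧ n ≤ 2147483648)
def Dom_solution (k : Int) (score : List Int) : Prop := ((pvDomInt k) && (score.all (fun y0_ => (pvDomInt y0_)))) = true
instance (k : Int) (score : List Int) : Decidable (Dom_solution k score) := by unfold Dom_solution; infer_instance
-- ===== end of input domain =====

-- B replaces A's six staged passes (diff list, counting dict, enumerate/index-into-keys selection,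
-- marked position set, set difference) by ONE streaming loop over the diffs with a carry flag,
-- counting covered positions on the fly (after one counting pass); same answer by a different decomposition.

-- ===== PORT A =====
def solution (k : Int) (score : List Int) : Int :=
  let scoreDiff : List Int :=
    (PySem.List.pyRange 0 ((score.length : Int) - 1) 1).foldl
      (fun acc i => acc ++ [PySem.List.pyGetD score i 0 - PySem.List.pyGetD score (i + 1) 0]) []
      -- score[i], score[i+1]: i ∈ range(len(score)-1) is always in range, so pyGetD is exact here
  let scoreDict : PySem.Dict Int Int :=
    scoreDiff.foldl
      (fun d diff =>
        if d.contains diff = false then d.insert diff 1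
        else d.insert diff (d.getD diff 0 + 1))   -- score_dict[diff]: key present in this branch, getD exact
      PySem.Dict.empty
  let temp : List Int :=
    (PySem.List.enumerate scoreDict.values 0).foldl
      (fun acc p => if k ≤ p.2 then acc ++ [p.1] else acc) []
  let resultKeys : List Int :=
    temp.foldl (fun acc t => acc ++ [PySem.List.pyGetD scoreDict.keys t 0]) []
      -- list(score_dict.keys())[t]: t is an index of the values list, always in range, pyGetD exact
  let resultDefaultSet : PySem.Set Int :=
    PySem.Set.ofList (PySem.List.pyRange 1 ((score.length : Int) + 1) 1)
  let resultSet : PySem.Set Int :=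
    (PySem.List.enumerate scoreDiff 0).foldl
      (fun s p => if resultKeys.contains p.2 then
          PySem.Set.add (PySem.Set.add s (p.1 + 1)) (p.1 + 2) else s)
      PySem.Set.empty
  PySem.Set.len (PySem.Set.diff resultDefaultSet resultSet)

-- ===== PORT B =====
def solution_alt (k : Int) (score : List Int) : Int :=
  let n : Int := (score.length : Int)
  let diffs : List Int :=
    (PySem.List.pyRange 0 (n - 1) 1).map
      (fun i => PySem.List.pyGetD score i 0 - PySem.List.pyGetD score (i + 1) 0)
      -- score[i], score[i+1]: i ∈ range(n-1) is always in range, so pyGetD is exact here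
  let counts : PySem.Dict Int Int :=
    diffs.foldl (fun d x => d.insert x (d.getD x 0 + 1)) PySem.Dict.empty
  let st : Int × Bool :=
    diffs.foldl
      (fun (st : Int × Bool) d =>
        let cur := decide (k ≤ counts.getD d 0)
        -- counts[d]: d was just counted, so the key is always present; getD is exact here
        (if st.2 || cur then st.1 + 1 else st.1, cur))
      (0, false)
  let covered : Int := st.1 + (if st.2 then 1 else 0)
  n - covered

-- ===== PRECONDITION & SPEC =====
def Spec_solution (k : Int) (score : List Int) (out : Int) : Prop := out = solution_alt k score
instance (k : Int) (score : List Int) (out : Int) : Decidable (Spec_solution k score out) := by unfold Spec_solution; infer_instance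

-- ===== CLAIM (what is proved, stated in full; the proofs are below) =====
def Claim_equal_solution : Prop := ∀ (k : Int) (score : List Int), Dom_solution k score → Spec_solution k score (solution k score)

-- ===== LEMMAS AND PROOFS =====

def pvDiffs (score : List Int) : List Int := (score.zip score.tail).map (fun p => p.1 - p.2)

lemma pv_diffs_eq (score : List Int) :
    (PySem.List.pyRange 0 ((score.length : Int) - 1) 1).map
      (fun i => PySem.List.pyGetD score i 0 - PySem.List.pyGetD score (i + 1) 0)
      = pvDiffs score := by
  apply List.ext_getElem
  · simp [pvDiffs, PySem.List.length_pyRange_one]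
  · intro t h1 h2
    have hlen : t < score.length - 1 := by
      simpa [pvDiffs] using h2
    simp only [List.getElem_map, PySem.List.getElem_pyRange_one, pvDiffs, List.getElem_zip]
    have e1 : (0 : Int) + (t : Int) = ((t : Nat) : Int) := by omega
    rw [e1, PySem.List.pyGetD_natCast]
    have e2 : ((t : Nat) : Int) + 1 = (((t + 1 : Nat)) : Int) := by push_cast; omega
    rw [e2, PySem.List.pyGetD_natCast]
    rw [List.getD_eq_getElem _ _ (by omega), List.getD_eq_getElem _ _ (by omega)]
    congr 1
    simp [List.getElem_tail]

lemma pv_mark_mem (R : List Int) (l : List (Int × Int)) (s : List Int) (y : Int) :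
    y ∈ l.foldl
      (fun s p => if R.contains p.2 then PySem.Set.add (PySem.Set.add s (p.1 + 1)) (p.1 + 2) else s) s
    ↔ y ∈ s ∨ ∃ p ∈ l, p.2 ∈ R ∧ (y = p.1 + 1 ∨ y = p.1 + 2) := by
  induction l generalizing s with
  | nil => simp
  | cons a l ih =>
    simp only [List.foldl_cons, ih, List.mem_cons]
    by_cases hc : a.2 ∈ R
    · have hct : R.contains a.2 = true := by simpa using hc
      simp only [hct, if_true, PySem.Set.mem_add]
      constructor
      · rintro (((h | h) | h) | ⟨p, hp, hr, ho⟩)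
        · exact Or.inl h
        · exact Or.inr ⟨a, Or.inl rfl, hc, Or.inl h⟩
        · exact Or.inr ⟨a, Or.inl rfl, hc, Or.inr h⟩
        · exact Or.inr ⟨p, Or.inr hp, hr, ho⟩
      · rintro (h | ⟨p, (rfl | hp), hr, ho⟩)
        · exact Or.inl (Or.inl (Or.inl h))
        · rcases ho with h | h
          · exact Or.inl (Or.inl (Or.inr h))
          · exact Or.inl (Or.inr h)
        · exact Or.inr ⟨p, hp, hr, ho⟩
    · have hct : R.contains a.2 = false := by simpa using hc
      simp only [hct, if_neg Bool.false_ne_true]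
      constructor
      · rintro (h | ⟨p, hp, hr, ho⟩)
        · exact Or.inl h
        · exact Or.inr ⟨p, Or.inr hp, hr, ho⟩
      · rintro (h | ⟨p, (rfl | hp), hr, ho⟩)
        · exact Or.inl h
        · exact absurd hr hc
        · exact Or.inr ⟨p, hp, hr, ho⟩

lemma pv_resultKeys_mem (k : Int) (ds : List Int) (x : Int) :
    x ∈ ((PySem.List.enumerate (PySem.Dict.counter ds).values 0).foldl
          (fun acc p => if k ≤ p.2 then acc ++ [p.1] else acc) []).foldl
        (fun acc t => acc ++ [PySem.List.pyGetD (PySem.Dict.counter (κ := Int) ds).keys t 0]) []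
    ↔ x ∈ ds ∧ k ≤ (ds.count x : Int) := by
  have hvals : (PySem.Dict.counter (κ := Int) ds).values
      = (PySem.Set.ofList ds).map (fun v => ((ds.count v : Nat) : Int)) := by
    show ((PySem.Dict.counter (κ := Int) ds).items).map _ = _
    rw [PySem.Dict.items_counter]
    simp [List.map_map, Function.comp]
  have hkeys : (PySem.Dict.counter (κ := Int) ds).keys = PySem.Set.ofList ds :=
    PySem.Dict.keys_counter ds
  set S := PySem.Set.ofList ds with hS
  have hfe : (fun (acc : List Int) (p : Int × Int) => if k ≤ p.2 then acc ++ [p.1] else acc)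
      = (fun acc p => if (fun (p : Int × Int) => decide (k ≤ p.2)) p = true then acc ++ [p.1] else acc) := by
    funext acc p; simp
  rw [hfe, PySem.List.foldl_append_if, PySem.List.foldl_append_singleton_eq_map,
      List.nil_append, List.nil_append, List.map_map, List.mem_map]
  constructor
  · rintro ⟨p, hpf, rfl⟩
    rw [List.mem_filter] at hpf
    obtain ⟨hpe, hq⟩ := hpf
    rw [PySem.List.mem_enumerate_iff] at hpe
    obtain ⟨i, hi, hpeq⟩ := hpe
    subst hpeq
    rw [hvals] at hi
    have hiS : i < S.length := by simpa using hi
    simp only [hvals, List.getElem_map, decide_eq_true_eq] at hq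
    simp only [Function.comp_apply, hkeys]
    have hget : PySem.List.pyGetD S ((0:Int) + (i:Nat), (0:Int)).1 0 = S[i] := by
      show PySem.List.pyGetD S ((0:Int) + (i:Nat)) 0 = S[i]
      rw [zero_add, PySem.List.pyGetD_natCast, List.getD_eq_getElem _ _ hiS]
    refine ⟨?_, ?_⟩
    · rw [show PySem.List.pyGetD S ((0:Int) + ↑i, (PySem.Dict.counter (κ := Int) ds).values[i]).1 0
          = S[i] from hget]
      have hm := List.getElem_mem hiS
      rw [PySem.Set.mem_ofList] at hm
      exact hm
    · rw [show PySem.List.pyGetD S ((0:Int) + ↑i, (PySem.Dict.counter (κ := Int) ds).values[i]).1 0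
          = S[i] from hget]
      simpa using hq
  · rintro ⟨hmem, hcnt⟩
    have hxS : x ∈ S := by simpa [hS, PySem.Set.mem_ofList] using hmem
    obtain ⟨i, hiS, hxi⟩ := List.getElem_of_mem hxS
    have hi : i < (PySem.Dict.counter (κ := Int) ds).values.length := by
      rw [hvals]; simpa using hiS
    refine ⟨((0:Int) + (i:Nat), (PySem.Dict.counter (κ := Int) ds).values[i]), ?_, ?_⟩
    · rw [List.mem_filter]
      refine ⟨?_, ?_⟩
      · rw [PySem.List.mem_enumerate_iff]
        exact ⟨i, hi, rfl⟩
      · simp only [hvals, List.getElem_map, decide_eq_true_eq]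
        rw [hxi]
        exact_mod_cast hcnt
    · simp only [Function.comp_apply, hkeys]
      show PySem.List.pyGetD S ((0:Int) + (i:Nat)) 0 = x
      rw [zero_add, PySem.List.pyGetD_natCast, List.getD_eq_getElem _ _ hiS, hxi]

-- A's covered-positions condition, rephrased as the two adjacent-edge tests.
lemma pv_cover_iff (k : Int) (ds R : List Int) (n : Int)
    (hR : ∀ x, x ∈ R ↔ x ∈ ds ∧ k ≤ (ds.count x : Int))
    (hlen : (ds.length : Int) = n - 1) (j : Int) (h1 : 1 ≤ j) (h2 : j < n + 1) :
    (∃ p ∈ PySem.List.enumerate ds 0, p.2 ∈ R ∧ (j = p.1 + 1 ∨ j = p.1 + 2))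
    ↔ ((0 ≤ j - 2 ∧ k ≤ (ds.count (PySem.List.pyGetD ds (j - 2) 0) : Int)) ∨
       (j - 1 < n - 1 ∧ k ≤ (ds.count (PySem.List.pyGetD ds (j - 1) 0) : Int))) := by
  constructor
  · rintro ⟨p, hpe, hr, ho⟩
    rw [PySem.List.mem_enumerate_iff] at hpe
    obtain ⟨i, hi, rfl⟩ := hpe
    rw [hR] at hr
    rcases ho with h | h
    · refine Or.inr ⟨by omega, ?_⟩
      have e : j - 1 = ((i : Nat) : Int) := by simp at h ⊢; omega
      rw [e, PySem.List.pyGetD_natCast, List.getD_eq_getElem _ _ hi]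
      exact hr.2
    · refine Or.inl ⟨by simp at h ⊢; omega, ?_⟩
      have e : j - 2 = ((i : Nat) : Int) := by simp at h ⊢; omega
      rw [e, PySem.List.pyGetD_natCast, List.getD_eq_getElem _ _ hi]
      exact hr.2
  · rintro (⟨hge, hcnt⟩ | ⟨hlt, hcnt⟩)
    · have hi : (j - 2).toNat < ds.length := by omega
      refine ⟨((0:Int) + ((j-2).toNat : Nat), ds[(j-2).toNat]), ?_, ?_, ?_⟩
      · rw [PySem.List.mem_enumerate_iff]
        exact ⟨(j-2).toNat, hi, rfl⟩
      · show ds[(j-2).toNat] ∈ R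
        rw [hR]
        refine ⟨List.getElem_mem hi, ?_⟩
        rwa [PySem.List.pyGetD_of_nonneg ds 0 hge, List.getD_eq_getElem _ _ hi] at hcnt
      · right; show j = 0 + ((j-2).toNat : Int) + 2; omega
    · have hge : 0 ≤ j - 1 := by omega
      have hi : (j - 1).toNat < ds.length := by omega
      refine ⟨((0:Int) + ((j-1).toNat : Nat), ds[(j-1).toNat]), ?_, ?_, ?_⟩
      · rw [PySem.List.mem_enumerate_iff]
        exact ⟨(j-1).toNat, hi, rfl⟩
      · show ds[(j-1).toNat] ∈ R
        rw [hR]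
        refine ⟨List.getElem_mem hi, ?_⟩
        rwa [PySem.List.pyGetD_of_nonneg ds 0 hge, List.getD_eq_getElem _ _ hi] at hcnt
      · left; show j = 0 + ((j-1).toNat : Int) + 1; omega

-- B's streaming loop with carry flag counts the true entries of (p::bs) OR (bs++[false]).
lemma pv_stream_eq (bs : List Bool) (c : Int) (p : Bool) :
    (bs.foldl (fun (st : Int × Bool) b => (if st.2 || b then st.1 + 1 else st.1, b)) (c, p)).1
      + (if (bs.foldl (fun (st : Int × Bool) b => (if st.2 || b then st.1 + 1 else st.1, b)) (c, p)).2 then 1 else 0)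
    = c + (((List.zipWith (fun a b => a || b) (p :: bs) (bs ++ [false])).countP id : Nat) : Int) := by
  induction bs generalizing c p with
  | nil => cases p <;> simp [List.countP, List.countP.go, id]
  | cons b l ih =>
    simp only [List.foldl_cons]
    rw [ih]
    simp only [List.cons_append, List.zipWith_cons_cons, List.countP_cons, id]
    cases p <;> cases b <;> simp <;> omega

-- The boolean "position j is covered" test B effectively performs at position j.
def pvCovB (k : Int) (ds : List Int) (n j : Int) : Bool :=
  (decide (0 ≤ j - 2) && decide (k ≤ (ds.count (PySem.List.pyGetD ds (j - 2) 0) : Int))) ||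
  (decide (j - 1 < n - 1) && decide (k ≤ (ds.count (PySem.List.pyGetD ds (j - 1) 0) : Int)))

-- The OR-zip of the frequency bits is the covered test mapped over the positions 1..n.
lemma pv_zip_eq_map (k : Int) (ds : List Int) (n : Int) (hn : 1 ≤ n)
    (hlen : (ds.length : Int) = n - 1) :
    List.zipWith (fun a b => a || b)
      (false :: ds.map (fun d => decide (k ≤ (ds.count d : Int))))
      (ds.map (fun d => decide (k ≤ (ds.count d : Int))) ++ [false])
    = (PySem.List.pyRange 1 (n + 1) 1).map (pvCovB k ds n) := by
  have hlds : ds.length = (n - 1).toNat := by omega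
  apply List.ext_getElem
  · simp [List.length_zipWith, PySem.List.length_pyRange_one]
    omega
  · intro t h1 h2
    have ht : t < (n - 1).toNat + 1 := by
      simp at h1; omega
    rw [List.getElem_zipWith, List.getElem_map, PySem.List.getElem_pyRange_one]
    have hj : (1 : Int) + t = (t : Int) + 1 := by ring
    rw [hj]
    unfold pvCovB
    have hleft : (false :: ds.map (fun d => decide (k ≤ (ds.count d : Int))))[t]'(by simp; omega)
        = (decide (0 ≤ ((t : Int) + 1) - 2) &&
           decide (k ≤ (ds.count (PySem.List.pyGetD ds (((t : Int) + 1) - 2) 0) : Int))) := by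
      cases t with
      | zero => simp
      | succ m =>
        have hm : m < ds.length := by omega
        rw [List.getElem_cons_succ, List.getElem_map]
        have e : ((m + 1 : Nat) : Int) + 1 - 2 = ((m : Nat) : Int) := by push_cast; ring
        rw [e, PySem.List.pyGetD_natCast, List.getD_eq_getElem _ _ hm]
        simp
    have hright : (ds.map (fun d => decide (k ≤ (ds.count d : Int))) ++ [false])[t]'(by simp; omega)
        = (decide (((t : Int) + 1) - 1 < n - 1) &&
           decide (k ≤ (ds.count (PySem.List.pyGetD ds (((t : Int) + 1) - 1) 0) : Int))) := by
      by_cases hm : t < ds.length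
      · rw [List.getElem_append_left (by simpa using hm), List.getElem_map]
        have e : ((t : Nat) : Int) + 1 - 1 = ((t : Nat) : Int) := by ring
        rw [e, PySem.List.pyGetD_natCast, List.getD_eq_getElem _ _ hm]
        have hcond : (((t : Nat) : Int) < n - 1) := by omega
        simp [hcond]
      · have hteq : t = ds.length := by omega
        subst hteq
        rw [List.getElem_append_right (by simp)]
        have hcond : ¬ (((ds.length : Nat) : Int) + 1 - 1 < n - 1) := by omega
        simp only [List.length_map, Nat.sub_self, List.getElem_singleton,
          decide_eq_false hcond, Bool.false_and]
    rw [hleft, hright]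

-- countP of the negation versus n minus countP, in the cast/0-offset shape of the final goal.
lemma pv_final {n : Int} (r : List Int) (p q : Int → Bool) (h : ∀ x ∈ r, p x = !q x)
    (hl : (r.length : Int) = n) :
    ((r.countP p : Nat) : Int) = n - ((0 : Int) + ((r.countP q : Nat) : Int)) := by
  have h1 : r.countP p = r.countP (fun x => !q x) :=
    List.countP_congr (fun x hx => by rw [h x hx])
  have h2 := List.length_eq_countP_add_countP (p := q) (l := r)
  have h3 : r.countP (fun x => !q x) = r.countP (fun a => decide ¬(q a = true)) :=
    List.countP_congr (fun x _ => by cases q x <;> simp)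
  omega

theorem solution_spec : Claim_equal_solution := by
  intro k score _
  show solution k score = solution_alt k score
  simp only [solution, solution_alt]
  have hA : (List.foldl (fun acc i =>
        acc ++ [PySem.List.pyGetD score i 0 - PySem.List.pyGetD score (i + 1) 0]) []
        (PySem.List.pyRange 0 ((score.length : Int) - 1) 1)) = pvDiffs score := by
    rw [PySem.List.foldl_append_singleton_eq_map, List.nil_append, pv_diffs_eq]
  rw [hA, pv_diffs_eq]
  set ds := pvDiffs score with hds
  set n : Int := (score.length : Int) with hn
  have hdict : ds.foldl
      (fun d diff => if d.contains diff = false then d.insert diff 1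
        else d.insert diff (d.getD diff 0 + 1)) PySem.Dict.empty
      = PySem.Dict.counter ds := by
    rw [← PySem.Dict.foldl_insert_getD_add_one_eq_counter]
    apply List.foldl_ext
    intro d diff _
    by_cases hc : d.contains diff = true
    · simp [hc]
    · have hcf : d.contains diff = false := by simpa using hc
      have h0 := PySem.Dict.getD_of_not_contains d (0 : Int) hcf
      simp [hcf, h0]
  rw [hdict]
  rw [PySem.Set.ofList_eq_self_of_nodup _ (PySem.List.nodup_pyRange_one 1 _)]
  simp only [PySem.Set.len, PySem.Set.diff]
  rw [← List.countP_eq_length_filter]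
  -- B side: rewrite the fold over diffs into a fold over the frequency bits
  have hcnt : ds.foldl (fun d x => d.insert x (d.getD x 0 + 1)) PySem.Dict.empty
      = PySem.Dict.counter ds := PySem.Dict.foldl_insert_getD_add_one_eq_counter ds
  rw [hcnt]
  have hmapfold :
      ds.foldl (fun (st : Int × Bool) d =>
          (if st.2 || decide (k ≤ (PySem.Dict.counter ds).getD d 0) then st.1 + 1 else st.1,
           decide (k ≤ (PySem.Dict.counter ds).getD d 0))) (0, false)
      = (ds.map (fun d => decide (k ≤ (ds.count d : Int)))).foldl
          (fun (st : Int × Bool) b => (if st.2 || b then st.1 + 1 else st.1, b)) (0, false) := by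
    rw [List.foldl_map]
    apply List.foldl_ext
    intro st d _
    rw [PySem.Dict.getD_counter]
  have hlen : (ds.length : Int) = n - 1 ∨ (n = 0 ∧ ds = []) := by
    rcases score with _ | ⟨a, score'⟩
    · right; constructor
      · simp [hn]
      · simp [hds, pvDiffs]
    · left
      have : ds.length = score'.length := by simp [hds, pvDiffs]
      simp [hn, this]
  rcases hlen with hlen | ⟨hn0, hds0⟩
  · -- n ≥ 1
    have hn1 : 1 ≤ n := by omega
    simp only [hmapfold, pv_stream_eq, pv_zip_eq_map k ds n hn1 hlen]
    rw [List.countP_map]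
    apply pv_final
    · intro j hj
      rw [PySem.List.mem_pyRange_one] at hj
      simp only [Function.comp_apply, id]
      congr 1
      rw [Bool.eq_iff_iff, PySem.Set.contains_iff, pv_mark_mem]
      simp only [PySem.Set.empty, List.not_mem_nil, false_or]
      rw [pv_cover_iff k ds _ n (fun x => pv_resultKeys_mem k ds x) hlen j hj.1 hj.2]
      unfold pvCovB
      simp
    · rw [PySem.List.length_pyRange_one]
      omega
  · -- n = 0: score is empty
    rw [hds0, hn0]
    simp [PySem.List.enumerate]
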